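-- pv_equiv track=rewrite | github.com/tsunamayo7/helix-ai-studio | src/routing/policy_checker.py | _infer_tool_scopes
-- ===== SOURCE A (Python) =====
-- from typing import Optional, Dict, Any, Tuple, Set
--
-- def _infer_tool_scopes(
--
--     tool_name: str,
--     tool_args: Optional[Dict[str, Any]] = None,
-- ) -> list:
--     """ツール名から必要なスコープを推定"""
--     scopes = []
--
--     tool_lower = tool_name.lower()
--
--     # ファイル操作
--     if any(w in tool_lower for w in ["read_file", "list_directory", "get_file"]):
--         scopes.append("FS_READ")
--     if any(w in tool_lower for w in ["write_file", "create_file", "edit_file"]):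
--         scopes.append("FS_WRITE")
--     if any(w in tool_lower for w in ["delete_file", "remove_file"]):
--         scopes.append("FS_DELETE")
--
--     # Git操作
--     if any(w in tool_lower for w in ["git_status", "git_diff", "git_log"]):
--         scopes.append("GIT_READ")
--     if any(w in tool_lower for w in ["git_commit", "git_push", "git_checkout", "git_branch"]):
--         scopes.append("GIT_WRITE")
--
--     # ネットワーク
--     if any(w in tool_lower for w in ["search", "fetch", "http", "web", "api"]):
--         scopes.append("NETWORK")
--
--     return scopes
-- ===== SOURCE B (Python) =====
-- KW = {"read_file": "FS_READ", "list_directory": "FS_READ", "get_file": "FS_READ",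
--       "write_file": "FS_WRITE", "create_file": "FS_WRITE", "edit_file": "FS_WRITE",
--       "delete_file": "FS_DELETE", "remove_file": "FS_DELETE",
--       "git_status": "GIT_READ", "git_diff": "GIT_READ", "git_log": "GIT_READ",
--       "git_commit": "GIT_WRITE", "git_push": "GIT_WRITE", "git_checkout": "GIT_WRITE", "git_branch": "GIT_WRITE",
--       "search": "NETWORK", "fetch": "NETWORK", "http": "NETWORK", "web": "NETWORK", "api": "NETWORK"}
-- LENS = [3, 4, 5, 6, 7, 8, 9, 10, 11, 12, 14]  # the distinct keyword lengths
-- ORDER = ["FS_READ", "FS_WRITE", "FS_DELETE", "GIT_READ", "GIT_WRITE", "NETWORK"]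
--
-- def _infer_tool_scopes(tool_name, tool_args=None):
--     """Inverted keyword index: enumerate substrings of the lowered name at each
--     start position and keyword length, hash-look them up to collect a scope set,
--     then emit the scopes in the fixed canonical order."""
--     t = tool_name.lower()
--     found = set()
--     for i in range(len(t)):
--         for L in LENS:
--             sc = KW.get(t[i:i + L])
--             if sc is not None:
--                 found.add(sc)
--     return [sc for sc in ORDER if sc in found]
-- ===== Notes on version B (the rewrite author's own statement) =====
-- stated objective: alternative
-- what changed: Replaces per-scope substring scans (any(w in name) per keyword group) by an inverted keyword->scope hash index: enumerate substrings of the lowered name at each start position and keyword length, look them up in the dict to collect a scope set, then emit scopes in the fixed canonical order.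
import Mathlib
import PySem

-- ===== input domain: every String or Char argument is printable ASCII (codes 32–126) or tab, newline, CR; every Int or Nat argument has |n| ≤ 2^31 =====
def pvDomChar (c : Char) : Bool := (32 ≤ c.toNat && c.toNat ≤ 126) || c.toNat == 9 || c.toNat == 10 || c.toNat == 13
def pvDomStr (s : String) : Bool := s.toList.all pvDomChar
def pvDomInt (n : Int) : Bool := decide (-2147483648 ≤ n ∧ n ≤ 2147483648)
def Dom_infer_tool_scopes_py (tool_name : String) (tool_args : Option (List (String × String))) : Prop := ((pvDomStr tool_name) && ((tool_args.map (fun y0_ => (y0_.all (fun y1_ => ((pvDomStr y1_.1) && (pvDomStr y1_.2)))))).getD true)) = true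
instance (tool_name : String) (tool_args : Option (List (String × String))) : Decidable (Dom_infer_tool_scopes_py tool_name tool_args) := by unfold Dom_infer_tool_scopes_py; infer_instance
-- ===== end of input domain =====

-- B replaces A's per-scope substring scans by an inverted keyword→scope index: enumerate substrings of the lowered name and hash-look them up (alternative algorithm; same return value).


-- ===== PORT A =====
def infer_tool_scopes_py (tool_name : String) (_tool_args : Option (List (String × String))) : List String :=
  let scopes : List String := []
  let tool_lower := PySem.Str.lower tool_name
  let scopes := if ["read_file", "list_directory", "get_file"].any (fun w => PySem.Str.isIn w tool_lower) then scopes ++ ["FS_READ"] else scopes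
  let scopes := if ["write_file", "create_file", "edit_file"].any (fun w => PySem.Str.isIn w tool_lower) then scopes ++ ["FS_WRITE"] else scopes
  let scopes := if ["delete_file", "remove_file"].any (fun w => PySem.Str.isIn w tool_lower) then scopes ++ ["FS_DELETE"] else scopes
  let scopes := if ["git_status", "git_diff", "git_log"].any (fun w => PySem.Str.isIn w tool_lower) then scopes ++ ["GIT_READ"] else scopes
  let scopes := if ["git_commit", "git_push", "git_checkout", "git_branch"].any (fun w => PySem.Str.isIn w tool_lower) then scopes ++ ["GIT_WRITE"] else scopes
  let scopes := if ["search", "fetch", "http", "web", "api"].any (fun w => PySem.Str.isIn w tool_lower) then scopes ++ ["NETWORK"] else scopes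
  scopes

-- ===== PORT B =====
-- the inverted index KW: keyword → scope (Python dict literal, distinct keys, insertion order)
def pvKW : List (String × String) :=
  [("read_file", "FS_READ"), ("list_directory", "FS_READ"), ("get_file", "FS_READ"),
   ("write_file", "FS_WRITE"), ("create_file", "FS_WRITE"), ("edit_file", "FS_WRITE"),
   ("delete_file", "FS_DELETE"), ("remove_file", "FS_DELETE"),
   ("git_status", "GIT_READ"), ("git_diff", "GIT_READ"), ("git_log", "GIT_READ"),
   ("git_commit", "GIT_WRITE"), ("git_push", "GIT_WRITE"), ("git_checkout", "GIT_WRITE"), ("git_branch", "GIT_WRITE"),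
   ("search", "NETWORK"), ("fetch", "NETWORK"), ("http", "NETWORK"), ("web", "NETWORK"), ("api", "NETWORK")]

def pvKWDict : PySem.Dict String String := PySem.Dict.mk pvKW

-- LENS: the distinct keyword lengths
def pvLens : List Nat := [3, 4, 5, 6, 7, 8, 9, 10, 11, 12, 14]

-- ORDER: the canonical scope order
def pvOrder : List String := ["FS_READ", "FS_WRITE", "FS_DELETE", "GIT_READ", "GIT_WRITE", "NETWORK"]

-- the loop body's lookup: KW.get(t[i:i+L])
def pvStep (t : String) (i L : Nat) : Option String :=
  pvKWDict.get? (PySem.Str.slice t (some (i : Int)) (some ((i : Int) + (L : Int))))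

-- the double loop of Source B collecting the scope set `found`
def pvFound (t : String) : PySem.Set String :=
  (List.range t.length).foldl (fun s (i : Nat) =>
    pvLens.foldl (fun s (L : Nat) =>
      match pvStep t i L with
      | some sc => PySem.Set.add s sc
      | none => s) s) PySem.Set.empty

def infer_tool_scopes_py_alt (tool_name : String) (_tool_args : Option (List (String × String))) : List String :=
  let t := PySem.Str.lower tool_name
  let found := pvFound t
  pvOrder.filter (fun sc => PySem.Set.contains found sc)

-- ===== PRECONDITION & SPEC =====
def Spec_infer_tool_scopes_py (tool_name : String) (tool_args : Option (List (String × String))) (out : List String) : Prop := out = infer_tool_scopes_py_alt tool_name tool_args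
instance (tool_name : String) (tool_args : Option (List (String × String))) (out : List String) : Decidable (Spec_infer_tool_scopes_py tool_name tool_args out) := by unfold Spec_infer_tool_scopes_py; infer_instance

-- ===== CLAIM (what is proved, stated in full; the proofs are below) =====
def Claim_equal_infer_tool_scopes_py : Prop := ∀ (tool_name : String) (tool_args : Option (List (String × String))), Dom_infer_tool_scopes_py tool_name tool_args → Spec_infer_tool_scopes_py tool_name tool_args (infer_tool_scopes_py tool_name tool_args)

-- ===== LEMMAS AND PROOFS =====

-- membership in a foldl whose step only ever adds elements to the set
theorem pv_mem_foldl {α : Type} (P : α → String → Prop)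
    (inner : α → PySem.Set String → PySem.Set String)
    (h : ∀ a s x, x ∈ inner a s ↔ x ∈ s ∨ P a x) :
    ∀ (l : List α) (s : PySem.Set String) (x : String),
      x ∈ l.foldl (fun s a => inner a s) s ↔ x ∈ s ∨ ∃ a ∈ l, P a x := by
  intro l
  induction l with
  | nil => intro s x; simp
  | cons a l ih =>
    intro s x
    simp only [List.foldl_cons, ih, h, List.mem_cons]
    constructor
    · rintro ((hs | hp) | ⟨b, hb, hpb⟩)
      · exact Or.inl hs
      · exact Or.inr ⟨a, Or.inl rfl, hp⟩
      · exact Or.inr ⟨b, Or.inr hb, hpb⟩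
    · rintro (hs | ⟨b, (rfl | hb), hpb⟩)
      · exact Or.inl (Or.inl hs)
      · exact Or.inl (Or.inr hpb)
      · exact Or.inr ⟨b, hb, hpb⟩

-- a successful first-match lookup yields a pair of the association list
theorem pv_get?_mem {l : List (String × String)} {k v : String}
    (h : (PySem.Dict.mk l).get? k = some v) : (k, v) ∈ l := by
  induction l with
  | nil => simp [PySem.Dict.get?] at h
  | cons p rest ih =>
    rcases p with ⟨k', v'⟩
    rw [PySem.Dict.get?_mk_cons] at h
    by_cases hk : k' == k
    · simp only [hk, if_pos] at h
      have hk' : k' = k := by simpa using hk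
      have hv : v' = v := Option.some.inj h
      subst hk'; subst hv
      exact List.mem_cons_self
    · simp only [hk, Bool.false_eq_true, if_false] at h
      exact List.mem_cons_of_mem _ (ih h)

-- every pair of the literal table is found by lookup
theorem pv_mem_get? : ∀ p ∈ pvKW, pvKWDict.get? p.1 = some p.2 := by decide

-- every keyword is nonempty and its length is in pvLens
theorem pv_kw_len : ∀ p ∈ pvKW, p.1.toList.length ∈ pvLens ∧ p.1.toList ≠ [] := by decide

-- one inner-loop step adds exactly a successful lookup's scope
theorem pv_mem_inner_add (t : String) (i : Nat) :
    ∀ (L : Nat) (s : PySem.Set String) (x : String),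
      x ∈ (fun L s => (match pvStep t i L with
        | some sc => PySem.Set.add s sc
        | none => s)) L s ↔ x ∈ s ∨ pvStep t i L = some x := by
  intro L s x
  cases hg : pvStep t i L with
  | none => simp [hg]
  | some sc => simp [hg, PySem.Set.mem_add, eq_comm, or_comm]

-- the inner loop over pvLens collects exactly the successful lookups at position i
theorem pv_mem_inner (t : String) (i : Nat) :
    ∀ (s : PySem.Set String) (x : String),
      x ∈ (fun i s => pvLens.foldl (fun s L =>
        (match pvStep t i L with
        | some sc => PySem.Set.add s sc
        | none => s)) s) i s ↔ x ∈ s ∨ ∃ L ∈ pvLens, pvStep t i L = some x := by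
  intro s x
  exact pv_mem_foldl (fun L x => pvStep t i L = some x) _ (pv_mem_inner_add t i) pvLens s x

-- membership characterisation of the collected scope set
theorem pv_contains_found (t : String) (S : String) :
    PySem.Set.contains (pvFound t) S = true ↔
      ∃ w, (w, S) ∈ pvKW ∧ PySem.Str.isIn w t = true := by
  rw [PySem.Set.contains_iff]
  unfold pvFound
  rw [pv_mem_foldl (fun i x => ∃ L ∈ pvLens, pvStep t i L = some x) _ (pv_mem_inner t)]
  constructor
  · rintro (hx | ⟨i, _hi, L, _hL, hg⟩)
    · simp [PySem.Set.empty] at hx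
    · unfold pvStep at hg
      refine ⟨PySem.Str.slice t (some (i : Int)) (some ((i : Int) + (L : Int))), pv_get?_mem hg, ?_⟩
      rw [PySem.Str.isIn_iff_infix, PySem.Str.toList_slice]
      have hsl : PySem.Chars.slice t.toList (some (i : Int)) (some ((i : Int) + (L : Int)))
          = (t.toList.drop i).take L := by
        rw [PySem.Chars.slice_eq_listSlice, PySem.List.slice_natCast_add]
      rw [hsl]
      exact ((t.toList.drop i).take_prefix L).isInfix.trans (t.toList.drop_suffix i).isInfix
  · rintro ⟨w, hmem, hin⟩
    rw [PySem.Str.isIn_iff_infix] at hin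
    obtain ⟨u, v, hw⟩ := hin
    obtain ⟨hL, hne⟩ := pv_kw_len _ hmem
    right
    refine ⟨u.length, ?_, w.toList.length, hL, ?_⟩
    · rw [List.mem_range]
      have hlen : t.toList.length = u.length + w.toList.length + v.length := by
        rw [← hw]; simp; omega
      have hwpos : 0 < w.toList.length := List.length_pos_iff.mpr hne
      have hsl : t.length = t.toList.length := Eq.symm String.length_toList
      omega
    · have hslice : PySem.Str.slice t (some (u.length : Int)) (some ((u.length : Int) + (w.toList.length : Int))) = w := by
        apply String.toList_inj.mp
        rw [PySem.Str.toList_slice, PySem.Chars.slice_eq_listSlice, PySem.List.slice_natCast_add,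
            ← hw, List.append_assoc, List.drop_left, List.take_left]
      unfold pvStep
      rw [hslice]
      exact pv_mem_get? _ hmem

-- per-scope Bool equality between B's set test and A's any-scan
theorem pv_scope_eq (ws : List String) (S : String)
    (h : ∀ w, (w, S) ∈ pvKW ↔ w ∈ ws) (t : String) :
    PySem.Set.contains (pvFound t) S = ws.any (fun w => PySem.Str.isIn w t) := by
  rw [Bool.eq_iff_iff, pv_contains_found, List.any_eq_true]
  constructor
  · rintro ⟨w, hw, hin⟩; exact ⟨w, (h w).mp hw, hin⟩
  · rintro ⟨w, hw, hin⟩; exact ⟨w, (h w).mpr hw, hin⟩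

-- ===== VERDICT (by name: the statement is the Claim_ definition above) =====
theorem infer_tool_scopes_py_spec : Claim_equal_infer_tool_scopes_py := by
  intro tool_name tool_args _
  unfold Spec_infer_tool_scopes_py
  unfold infer_tool_scopes_py infer_tool_scopes_py_alt
  simp only [pvOrder, List.filter_cons, List.filter_nil]
  rw [pv_scope_eq ["read_file", "list_directory", "get_file"] "FS_READ" (by intro w; simp [pvKW]),
      pv_scope_eq ["write_file", "create_file", "edit_file"] "FS_WRITE" (by intro w; simp [pvKW]),
      pv_scope_eq ["delete_file", "remove_file"] "FS_DELETE" (by intro w; simp [pvKW]),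
      pv_scope_eq ["git_status", "git_diff", "git_log"] "GIT_READ" (by intro w; simp [pvKW]),
      pv_scope_eq ["git_commit", "git_push", "git_checkout", "git_branch"] "GIT_WRITE" (by intro w; simp [pvKW]),
      pv_scope_eq ["search", "fetch", "http", "web", "api"] "NETWORK" (by intro w; simp [pvKW])]
  split_ifs <;> simp_all
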